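-- pv_equiv track=rewrite | github.com/genevrahenrike/subreddit-scrapper | analyze_repetitive_keywords.py | find_repeated_words
-- ===== SOURCE A (Python) =====
-- def find_repeated_words(terms):
--     """Find terms with repeated words."""
--     repeated = []
--
--     for term in terms:
--         words = term.lower().split()
--         word_counts = {}
--
--         for word in words:
--             word_counts[word] = word_counts.get(word, 0) + 1
--
--         # If any word appears more than once
--         if any(count > 1 for count in word_counts.values()):
--             repeated.append(term)
--
--     return repeated
-- ===== SOURCE B (Python) =====
-- def find_repeated_words(terms):
--     """Find terms with repeated words."""
--     repeated = []
--     for term in terms: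
--         ws = sorted(term.lower().split())
--         if any(x == y for x, y in zip(ws, ws[1:])):
--             repeated.append(term)
--     return repeated
-- ===== Notes on version B (the rewrite author's own statement) =====
-- stated objective: alternative
-- what changed: Detects a repeated word by sorting the lowercased word list and scanning adjacent pairs for equality, instead of building a per-word count dict and scanning its values.
import Mathlib
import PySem

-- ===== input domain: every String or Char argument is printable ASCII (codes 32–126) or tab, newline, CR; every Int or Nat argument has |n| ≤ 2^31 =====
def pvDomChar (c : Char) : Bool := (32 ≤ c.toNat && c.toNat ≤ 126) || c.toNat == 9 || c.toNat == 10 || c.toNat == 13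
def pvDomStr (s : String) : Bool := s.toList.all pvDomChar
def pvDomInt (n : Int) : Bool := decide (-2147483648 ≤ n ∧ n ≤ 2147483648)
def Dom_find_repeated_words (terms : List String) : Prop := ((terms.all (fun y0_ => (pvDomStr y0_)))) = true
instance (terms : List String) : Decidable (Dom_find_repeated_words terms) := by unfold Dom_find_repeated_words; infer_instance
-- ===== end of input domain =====

-- B detects a repeated word by sorting the lowercased word list and scanning adjacent
-- pairs for equality, instead of A's per-word count dict and any()-over-values scan.


-- ===== PORT A =====
def find_repeated_words (terms : List String) : List String :=
  terms.foldl (fun repeated term =>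
    let words := PySem.Str.split₀ (PySem.Str.lower term)
    let word_counts := words.foldl (fun d w => d.insert w (d.getD w 0 + 1)) (PySem.Dict.empty : PySem.Dict String Int)
    if word_counts.values.any (fun count => decide (1 < count)) then repeated ++ [term]
    else repeated) []

-- ===== PORT B =====
def find_repeated_words_alt (terms : List String) : List String :=
  terms.foldl (fun repeated term =>
    let ws := PySem.List.sorted (PySem.Str.split₀ (PySem.Str.lower term)) (fun x => x) false
    if (ws.zip (PySem.List.slice ws (some 1) none)).any (fun p => p.1 == p.2) then repeated ++ [term]
    else repeated) []

-- ===== PRECONDITION & SPEC =====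
def Spec_find_repeated_words (terms : List String) (out : List String) : Prop := out = find_repeated_words_alt terms
instance (terms : List String) (out : List String) : Decidable (Spec_find_repeated_words terms out) := by unfold Spec_find_repeated_words; infer_instance

-- ===== CLAIM (what is proved, stated in full; the proofs are below) =====
def Claim_equal_find_repeated_words : Prop := ∀ (terms : List String), Dom_find_repeated_words terms → Spec_find_repeated_words terms (find_repeated_words terms)

-- ===== LEMMAS AND PROOFS =====

-- A's per-term test: some count in the counting dict exceeds 1 iff the word list has a duplicate
theorem testA_eq (ws : List String) :
    ((ws.foldl (fun d w => d.insert w (d.getD w 0 + 1)) (PySem.Dict.empty : PySem.Dict String Int)).values.any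
        (fun count => decide (1 < count)))
      = decide (¬ ws.Nodup) := by
  rw [PySem.Dict.foldl_insert_getD_add_one_eq_counter ws]
  by_cases hnd : ws.Nodup
  · rw [decide_eq_false (by simpa using hnd)]
    simp only [PySem.Dict.values, PySem.Dict.items_counter, List.map_map, List.any_map,
      List.any_eq_false]
    intro k _
    have := List.nodup_iff_count_le_one.1 hnd k
    simp only [Function.comp, decide_eq_true_eq, not_lt]
    exact_mod_cast this
  · rw [decide_eq_true (by simpa using hnd)]
    rw [List.nodup_iff_count_le_one] at hnd
    push Not at hnd
    obtain ⟨a, ha⟩ := hnd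
    simp only [PySem.Dict.values, PySem.Dict.items_counter, List.map_map, List.any_map,
      List.any_eq_true]
    refine ⟨a, (PySem.Set.mem_ofList ws a).2 (List.count_pos_iff.1 (by omega)), ?_⟩
    simp only [Function.comp, decide_eq_true_eq]
    exact_mod_cast ha

-- adjacent-pair scan on a ≤-sorted list detects exactly a duplicate
theorem adj_any (l : List String) (hp : l.Pairwise (· ≤ ·)) :
    ((l.zip l.tail).any (fun p => p.1 == p.2)) = decide (¬ l.Nodup) := by
  induction l with
  | nil => decide
  | cons a l ih =>
    cases l with
    | nil => simp
    | cons b t =>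
      have hab : a ≤ b := (List.pairwise_cons.1 hp).1 b (by simp)
      have hpt : (b :: t).Pairwise (· ≤ ·) := (List.pairwise_cons.1 hp).2
      by_cases hEq : a = b
      · subst hEq
        simp [List.any_cons]
      · have hne : (a == b) = false := by simpa using hEq
        have hnotmem : a ∉ b :: t := by
          intro hmem
          rcases List.mem_cons.1 hmem with h | h
          · exact hEq h
          · exact hEq (le_antisymm hab ((List.pairwise_cons.1 hpt).1 a h))
        have : ((a :: b :: t).Nodup ↔ (b :: t).Nodup) := by
          constructor
          · exact fun h => (List.nodup_cons.1 h).2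
          · exact fun h => List.nodup_cons.2 ⟨hnotmem, h⟩
        calc ((a :: b :: t).zip (a :: b :: t).tail).any (fun p => p.1 == p.2)
            = ((b :: t).zip (b :: t).tail).any (fun p => p.1 == p.2) := by
              simp [List.zip, List.any_cons, hne]
          _ = decide (¬ (b :: t).Nodup) := ih hpt
          _ = decide (¬ (a :: b :: t).Nodup) := decide_eq_decide.2 (not_congr this).symm

-- B's per-term test equals the same duplicate condition
theorem testB_eq (ws : List String) :
    (((PySem.List.sorted ws (fun x => x) false).zip
        (PySem.List.slice (PySem.List.sorted ws (fun x => x) false) (some 1) none)).any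
        (fun p => p.1 == p.2))
      = decide (¬ ws.Nodup) := by
  rw [PySem.List.slice_from_one]
  have hp : (PySem.List.sorted ws (fun x => x) false).Pairwise (· ≤ ·) :=
    PySem.List.sorted_pairwise ws (fun x => x)
  rw [adj_any _ hp]
  exact decide_eq_decide.2 (not_congr (PySem.List.sorted_perm ws (fun x => x) false).nodup_iff)

-- ===== VERDICT (by name: the statement is the Claim_ definition above) =====
theorem find_repeated_words_spec : Claim_equal_find_repeated_words := by
  intro terms _
  unfold Spec_find_repeated_words find_repeated_words find_repeated_words_alt
  rw [PySem.List.foldl_append_if_eq_filter, PySem.List.foldl_append_if_eq_filter]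
  simp only [List.nil_append]
  exact List.filter_congr (fun t _ => by
    simp only [testA_eq, testB_eq])
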